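-- pv_equiv track=rewrite | github.com/Abdymambetov/Systemprogramming | option3/strings/exercize_39.py | solve
-- ===== SOURCE A (Python) =====
-- def solve(text):
--     """Solver: нахождение длины максимальной серии не-буквенных символов"""
--     max_length = 0  # Длина максимальной серии
--     current_length = 0  # Текущая длина серии
--
--     for char in text:
--         # Если символ не является буквой, увеличиваем текущую серию
--         if not char.isalpha():
--             current_length += 1
--             max_length = max(max_length, current_length)
--         else:
--             # Если символ — буква, сбрасываем текущую длину серии
--             current_length = 0
--
--     return max_length
-- ===== SOURCE B (Python) =====
-- def solve(text):
--     """B: materialize the maximal runs of (isalpha, length) first, then reduce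
--     with max over the non-letter runs (default 0)."""
--     runs = []
--     for ch in text:
--         alpha = ch.isalpha()
--         if runs and runs[-1][0] == alpha:
--             runs[-1][1] += 1
--         else:
--             runs.append([alpha, 1])
--     return max((n for a, n in runs if not a), default=0)
-- ===== Notes on version B (the rewrite author's own statement) =====
-- stated objective: alternative
-- what changed: A keeps a running counter and running maximum in one pass; B first materializes the list of maximal runs (key, length) and then reduces with max(..., default=0) over the non-letter runs.
import Mathlib
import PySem

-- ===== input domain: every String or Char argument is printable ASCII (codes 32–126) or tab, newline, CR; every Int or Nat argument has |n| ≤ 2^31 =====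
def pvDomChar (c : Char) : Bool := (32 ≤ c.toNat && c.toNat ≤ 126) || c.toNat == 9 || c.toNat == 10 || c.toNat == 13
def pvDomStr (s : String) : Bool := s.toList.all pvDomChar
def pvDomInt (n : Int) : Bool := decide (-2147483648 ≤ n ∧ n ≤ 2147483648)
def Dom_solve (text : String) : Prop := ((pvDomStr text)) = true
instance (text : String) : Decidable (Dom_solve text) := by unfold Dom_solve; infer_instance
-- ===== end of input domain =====

-- B materializes the maximal (isalpha, length) runs first and then reduces with max over the
-- non-letter runs; A keeps a running counter/max in one pass. Objective: alternative decomposition, same cost.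

-- ===== PORT A =====
-- one iteration of A's loop: (max_length, current_length) updated per character
def solveStep (st : Int × Int) (ch : Char) : Int × Int :=
  if ¬ PySem.Chars.isalpha ch then (max st.1 (st.2 + 1), st.2 + 1)
  else (st.1, 0)

def solve (text : String) : Int :=
  (text.toList.foldl solveStep (0, 0)).1

-- ===== PORT B =====
-- one loop iteration of Source B: extend the last run or start a new one
def solveRunsStep (runs : List (Bool × Int)) (ch : Char) : List (Bool × Int) :=
  let alpha := PySem.Chars.isalpha ch
  match runs.getLast? with
  | some (a, n) => if a == alpha then runs.dropLast ++ [(a, n + 1)] else runs ++ [(alpha, 1)]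
  | none => runs ++ [(alpha, 1)]

def solve_alt (text : String) : Int :=
  let runs := text.toList.foldl solveRunsStep []
  PySem.List.maxD (runs.filterMap (fun p => if p.1 then none else some p.2)) (fun n => n) 0

-- ===== PRECONDITION & SPEC =====
def Spec_solve (text : String) (out : Int) : Prop := out = solve_alt text
instance (text : String) (out : Int) : Decidable (Spec_solve text out) := by unfold Spec_solve; infer_instance

-- ===== CLAIM (what is proved, stated in full; the proofs are below) =====
def Claim_equal_solve : Prop := ∀ (text : String), Dom_solve text → Spec_solve text (solve text)

-- ===== LEMMAS AND PROOFS =====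

-- the max over non-letter runs, as a fold (proof-side characterisation of B's reduce)
def selM (runs : List (Bool × Int)) : Int :=
  (runs.filterMap (fun p => if p.1 then none else some p.2)).foldl max 0

-- the length of the last run if it is a non-letter run, else 0 (A's current counter)
def tailLen (runs : List (Bool × Int)) : Int :=
  match runs.getLast? with
  | some (false, n) => n
  | _ => 0

theorem solveStep_true {c : Char} (h : PySem.Chars.isalpha c = true) (st : Int × Int) :
    solveStep st c = (st.1, 0) := by simp [solveStep, h]

theorem solveStep_false {c : Char} (h : PySem.Chars.isalpha c = false) (st : Int × Int) :
    solveStep st c = (max st.1 (st.2 + 1), st.2 + 1) := by simp [solveStep, h]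

theorem step_nil (c : Char) : solveRunsStep [] c = [] ++ [(PySem.Chars.isalpha c, 1)] := by
  simp [solveRunsStep]

theorem step_concat_same (pre : List (Bool × Int)) (a : Bool) (n : Int) (c : Char)
    (h : PySem.Chars.isalpha c = a) :
    solveRunsStep (pre ++ [(a, n)]) c = pre ++ [(a, n + 1)] := by
  simp [solveRunsStep, h]

theorem step_concat_diff (pre : List (Bool × Int)) (a : Bool) (n : Int) (c : Char)
    (h : PySem.Chars.isalpha c ≠ a) :
    solveRunsStep (pre ++ [(a, n)]) c = (pre ++ [(a, n)]) ++ [(PySem.Chars.isalpha c, 1)] := by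
  simp [solveRunsStep, Ne.symm h]

theorem selM_concat (pre : List (Bool × Int)) (a : Bool) (n : Int) :
    selM (pre ++ [(a, n)]) = if a then selM pre else max (selM pre) n := by
  cases a <;> simp [selM, List.filterMap_append, List.foldl_append]

theorem tailLen_concat (pre : List (Bool × Int)) (a : Bool) (n : Int) :
    tailLen (pre ++ [(a, n)]) = if a then 0 else n := by
  cases a <;> simp [tailLen]

theorem mem_concat_pos {runs : List (Bool × Int)} {a : Bool} {n : Int}
    (h3 : ∀ p ∈ runs, 1 ≤ p.2) (hn : 1 ≤ n) : ∀ p ∈ runs ++ [(a, n)], 1 ≤ p.2 := by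
  intro p hp
  rcases List.mem_append.1 hp with hp | hp
  · exact h3 p hp
  · simp at hp
    rw [hp]
    exact hn

theorem loop_inv (cs : List Char) :
    (cs.foldl solveStep (0, 0)).1 = selM (cs.foldl solveRunsStep []) ∧
    (cs.foldl solveStep (0, 0)).2 = tailLen (cs.foldl solveRunsStep []) ∧
    (∀ p ∈ cs.foldl solveRunsStep [], 1 ≤ p.2) := by
  induction cs using List.reverseRecOn with
  | nil => simp [selM, tailLen]
  | append_singleton cs c ih =>
    obtain ⟨h1, h2, h3⟩ := ih
    rw [List.foldl_append, List.foldl_append]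
    simp only [List.foldl_cons, List.foldl_nil]
    rcases List.eq_nil_or_concat (cs.foldl solveRunsStep []) with hnil | ⟨pre, ⟨a, n⟩, heq⟩
    · rw [hnil] at h1 h2 ⊢
      simp only [selM, tailLen, List.filterMap_nil, List.foldl_nil] at h1 h2
      rw [step_nil, selM_concat, tailLen_concat]
      cases hα : PySem.Chars.isalpha c
      · rw [solveStep_false hα, h1, h2]
        refine ⟨by simp [selM], by simp, by simp⟩
      · rw [solveStep_true hα, h1]
        exact ⟨by simp [selM], by simp, by simp⟩
    · simp only [List.concat_eq_append] at heq
      rw [heq] at h1 h2 h3 ⊢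
      have hn : (1 : Int) ≤ n := h3 (a, n) (by simp)
      rw [selM_concat] at h1
      rw [tailLen_concat] at h2
      by_cases hsame : PySem.Chars.isalpha c = a
      · rw [step_concat_same pre a n c hsame, selM_concat, tailLen_concat]
        have h3' : ∀ p ∈ pre ++ [(a, n + 1)], 1 ≤ p.2 :=
          mem_concat_pos (fun p hp => h3 p (List.mem_append.2 (Or.inl hp))) (by omega)
        cases a with
        | false =>
          rw [if_neg Bool.false_ne_true] at h1 h2
          rw [solveStep_false hsame, h1, h2, if_neg Bool.false_ne_true,
            if_neg Bool.false_ne_true]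
          exact ⟨by omega, rfl, h3'⟩
        | true =>
          rw [if_pos rfl] at h1 h2
          rw [solveStep_true hsame, h1, if_pos rfl, if_pos rfl]
          exact ⟨rfl, rfl, h3'⟩
      · rw [step_concat_diff pre a n c hsame, selM_concat, tailLen_concat]
        have h3' : ∀ p ∈ (pre ++ [(a, n)]) ++ [(PySem.Chars.isalpha c, 1)], 1 ≤ p.2 :=
          mem_concat_pos h3 (by omega)
        cases hα : PySem.Chars.isalpha c with
        | false =>
          have ha : a = true := by cases a <;> simp_all
          subst ha
          rw [if_pos rfl] at h1 h2
          rw [solveStep_false hα, h1, h2]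
          rw [hα] at h3'
          refine ⟨?_, by norm_num, h3'⟩
          rw [if_neg Bool.false_ne_true, selM_concat, if_pos rfl]
          norm_num
        | true =>
          have ha : a = false := by cases a <;> simp_all
          subst ha
          rw [if_neg Bool.false_ne_true] at h1 h2
          rw [solveStep_true hα, h1]
          rw [hα] at h3'
          refine ⟨?_, by rw [if_pos rfl], h3'⟩
          rw [if_pos rfl, selM_concat, if_neg Bool.false_ne_true]

theorem maxD_id_eq_foldl (l : List Int) (hl : ∀ x ∈ l, 1 ≤ x) :
    PySem.List.maxD l (fun n => n) 0 = l.foldl max 0 := by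
  cases l with
  | nil => simp [PySem.List.maxD, PySem.List.max?]
  | cons x t =>
    have h1 : 1 ≤ x := hl x (by simp)
    rw [PySem.List.maxD, PySem.List.max?_id_cons]
    simp only [Option.getD_some]
    have hx : max 0 x = x := by omega
    rw [List.foldl_cons, hx]

-- ===== VERDICT (by name: the statement is the Claim_ definition above) =====
theorem solve_spec : Claim_equal_solve := by
  intro text _
  unfold Spec_solve solve solve_alt
  obtain ⟨h1, _, h3⟩ := loop_inv text.toList
  rw [h1, maxD_id_eq_foldl]
  · rfl
  · intro x hx
    rcases List.mem_filterMap.1 hx with ⟨p, hp, hpx⟩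
    by_cases hb : p.1 <;> simp [hb] at hpx
    subst hpx
    exact h3 p hp
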